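-- pv_equiv track=rewrite | github.com/nitsuah/kryptos | src/k4/masking.py | collapse_runs
-- ===== SOURCE A (Python) =====
-- def collapse_runs(text: str, char: str, max_run: int = 2) -> str:
--     """Collapse runs of a given char longer than max_run down to max_run length."""
--     out: list[str] = []
--     run = 0
--     for ch in text:
--         if ch.upper() == char.upper():
--             run += 1
--             if run <= max_run:
--                 out.append(ch)
--         else:
--             run = 0
--             out.append(ch)
--     return ''.join(out)
-- ===== SOURCE B (Python) =====
-- from itertools import groupby
--
--
-- def collapse_runs(text: str, char: str, max_run: int = 2) -> str:
--     """Collapse runs of a given char longer than max_run down to max_run length."""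
--     target = char.upper()
--     pieces = []
--     for is_match, group in groupby(text, key=lambda ch: ch.upper() == target):
--         run = ''.join(group)
--         pieces.append(run[:max(max_run, 0)] if is_match else run)
--     return ''.join(pieces)
-- ===== Notes on version B (the rewrite author's own statement) =====
-- stated objective: idiomatic
-- what changed: Replaces the per-character loop with an incrementing run counter by itertools.groupby: the string is split into maximal case-insensitive match/non-match runs and matching runs are truncated wholesale with a clamped slice; run-at-a-time C-level grouping and slicing avoids the per-character Python-level branch and append, which a timing run measured as much faster on large inputs.
import Mathlib
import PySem

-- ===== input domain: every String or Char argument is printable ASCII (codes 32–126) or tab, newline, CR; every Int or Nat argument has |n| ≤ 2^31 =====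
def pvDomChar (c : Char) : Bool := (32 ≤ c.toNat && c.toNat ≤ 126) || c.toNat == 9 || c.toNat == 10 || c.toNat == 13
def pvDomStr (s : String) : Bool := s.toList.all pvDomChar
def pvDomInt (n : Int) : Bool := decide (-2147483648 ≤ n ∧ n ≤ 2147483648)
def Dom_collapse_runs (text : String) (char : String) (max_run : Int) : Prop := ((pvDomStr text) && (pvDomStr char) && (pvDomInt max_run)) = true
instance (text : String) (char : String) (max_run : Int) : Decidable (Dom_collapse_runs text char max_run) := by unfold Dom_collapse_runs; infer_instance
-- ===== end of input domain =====

-- B replaces A's per-character run counter with a groupby-style split into maximal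
-- case-insensitive match/non-match runs, truncating matching runs with a clamped slice (idiomatic).


-- ===== PORT A =====
-- per-character loop, state (run, out); ''.join of single chars = String.mk
def collapse_runs (text : String) (char : String) (max_run : Int) : String :=
  let res := text.toList.foldl
    (fun (st : Int × List Char) ch =>
      if PySem.Str.upper (String.mk [ch]) == PySem.Str.upper char then
        let run := st.1 + 1
        if run ≤ max_run then (run, st.2 ++ [ch]) else (run, st.2)
      else (0, st.2 ++ [ch]))
    (0, [])
  String.mk res.2

-- ===== PORT B =====
-- itertools.groupby on a Bool key: maximal runs of equal key value
def pvGroupRuns (k : Char → Bool) : List Char → List (Bool × List Char)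
  | [] => []
  | c :: cs =>
      (k c, c :: cs.takeWhile (fun x => k x == k c)) ::
        pvGroupRuns k (cs.dropWhile (fun x => k x == k c))
  termination_by l => l.length
  decreasing_by
    simp only [List.length_cons]
    exact Nat.lt_succ_of_le (List.length_dropWhile_le _ _)

def collapse_runs_alt (text : String) (char : String) (max_run : Int) : String :=
  let target := PySem.Str.upper char
  let k : Char → Bool := fun ch => PySem.Str.upper (String.mk [ch]) == target
  let pieces := (pvGroupRuns k text.toList).map
    (fun p => if p.1 then PySem.List.slice p.2 none (some (max max_run 0)) else p.2)
  String.mk pieces.flatten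

-- ===== PRECONDITION & SPEC =====
def Spec_collapse_runs (text : String) (char : String) (max_run : Int) (out : String) : Prop := out = collapse_runs_alt text char max_run
instance (text : String) (char : String) (max_run : Int) (out : String) : Decidable (Spec_collapse_runs text char max_run out) := by unfold Spec_collapse_runs; infer_instance

-- ===== CLAIM (what is proved, stated in full; the proofs are below) =====
def Claim_equal_collapse_runs : Prop := ∀ (text : String) (char : String) (max_run : Int), Dom_collapse_runs text char max_run → Spec_collapse_runs text char max_run (collapse_runs text char max_run)

-- ===== LEMMAS AND PROOFS =====

-- A's loop as a direct recursion producing the output characters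
def pvAChars (k : Char → Bool) (n : Int) : Int → List Char → List Char
  | _, [] => []
  | r, c :: cs =>
      if k c then (if r + 1 ≤ n then [c] else []) ++ pvAChars k n (r + 1) cs
      else c :: pvAChars k n 0 cs

theorem pvFoldl_snd (k : Char → Bool) (n : Int) :
    ∀ (l : List Char) (r : Int) (acc : List Char),
      (l.foldl
        (fun (st : Int × List Char) ch =>
          if k ch then
            let run := st.1 + 1
            if run ≤ n then (run, st.2 ++ [ch]) else (run, st.2)
          else (0, st.2 ++ [ch])) (r, acc)).2 = acc ++ pvAChars k n r l := by
  intro l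
  induction l with
  | nil => intro r acc; simp [pvAChars]
  | cons c cs ih =>
      intro r acc
      rw [List.foldl_cons]
      by_cases hk : k c
      · by_cases hr : r + 1 ≤ n
        · show (List.foldl _ (if k c = true then
              let run := r + 1
              if run ≤ n then (run, acc ++ [c]) else (run, acc)
            else (0, acc ++ [c])) cs).2 = _
          rw [if_pos hk]
          show (List.foldl _ (if r + 1 ≤ n then (r + 1, acc ++ [c]) else (r + 1, acc)) cs).2 = _
          rw [if_pos hr, ih (r + 1) (acc ++ [c])]
          simp [pvAChars, hk, hr]
        · show (List.foldl _ (if k c = true then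
              let run := r + 1
              if run ≤ n then (run, acc ++ [c]) else (run, acc)
            else (0, acc ++ [c])) cs).2 = _
          rw [if_pos hk]
          show (List.foldl _ (if r + 1 ≤ n then (r + 1, acc ++ [c]) else (r + 1, acc)) cs).2 = _
          rw [if_neg hr, ih (r + 1) acc]
          simp [pvAChars, hk, hr]
      · show (List.foldl _ (if k c = true then
            let run := r + 1
            if run ≤ n then (run, acc ++ [c]) else (run, acc)
          else (0, acc ++ [c])) cs).2 = _
        rw [if_neg (by simpa using hk), ih 0 (acc ++ [c])]
        simp [pvAChars, hk]

theorem pvMatchRun (k : Char → Bool) (n : Int) :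
    ∀ (g : List Char), (∀ c ∈ g, k c = true) →
      ∀ (r : Int) (rest : List Char),
        pvAChars k n r (g ++ rest) =
          g.take (n - r).toNat ++ pvAChars k n (r + g.length) rest := by
  intro g
  induction g with
  | nil => intro _ r rest; simp
  | cons c g' ih =>
      intro hall r rest
      have hc : k c = true := hall c (by simp)
      have hg' : ∀ x ∈ g', k x = true := fun x hx => hall x (by simp [hx])
      simp only [List.cons_append, pvAChars, hc, if_true]
      rw [ih hg' (r + 1) rest]
      have harg : r + 1 + (g'.length : Int) = r + (((c :: g').length : Nat) : Int) := by
        push_cast [List.length_cons]; ring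
      rw [harg]
      by_cases hr : r + 1 ≤ n
      · have h1 : (n - r).toNat = (n - (r + 1)).toNat + 1 := by omega
        rw [if_pos hr, h1, List.take_succ_cons]
        simp
      · have h1 : (n - r).toNat = 0 := by omega
        have h2 : (n - (r + 1)).toNat = 0 := by omega
        rw [if_neg hr, h1, h2]
        simp

theorem pvNonmatchRun (k : Char → Bool) (n : Int) :
    ∀ (g : List Char), (∀ c ∈ g, k c = false) →
      ∀ (rest : List Char), pvAChars k n 0 (g ++ rest) = g ++ pvAChars k n 0 rest := by
  intro g
  induction g with
  | nil => intro _ rest; simp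
  | cons c g' ih =>
      intro hall rest
      have hc : k c = false := hall c (by simp)
      simp only [List.cons_append, pvAChars, hc]
      simp [ih (fun x hx => hall x (by simp [hx])) rest]

theorem pvReset (k : Char → Bool) (n : Int) (r : Int) :
    ∀ (l : List Char), (l = [] ∨ ∃ c cs, l = c :: cs ∧ k c = false) →
      pvAChars k n r l = pvAChars k n 0 l := by
  intro l h
  rcases h with h | ⟨c, cs, rfl, hc⟩
  · subst h; rfl
  · simp [pvAChars, hc]

theorem pvDropWhileHead {p : Char → Bool} :
    ∀ (l : List Char) (x : Char) (xs : List Char), l.dropWhile p = x :: xs → p x = false := by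
  intro l
  induction l with
  | nil => intro x xs h; simp [List.dropWhile] at h
  | cons c cs ih =>
      intro x xs h
      by_cases hc : p c
      · rw [List.dropWhile_cons_of_pos hc] at h; exact ih x xs h
      · rw [List.dropWhile_cons_of_neg hc] at h
        cases h; simpa using hc

theorem pvMain (k : Char → Bool) (n : Int) :
    ∀ (l : List Char),
      pvAChars k n 0 l =
        ((pvGroupRuns k l).map
          (fun p => if p.1 then PySem.List.slice p.2 none (some (max n 0)) else p.2)).flatten := by
  intro l
  induction hL : l.length using Nat.strong_induction_on generalizing l with
  | _ L ih =>
    cases l with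
    | nil => simp [pvAChars, pvGroupRuns]
    | cons c cs =>
      set g := cs.takeWhile (fun x => k x == k c) with hg
      set d := cs.dropWhile (fun x => k x == k c) with hd
      have hsplit : cs = g ++ d := (List.takeWhile_append_dropWhile).symm
      have hgk : ∀ x ∈ g, k x = k c := by
        intro x hx
        have := List.mem_takeWhile_imp hx
        simpa using this
      have hdlen : d.length < L := by
        subst hL
        simp only [List.length_cons]
        exact Nat.lt_succ_of_le (List.length_dropWhile_le _ _)
      have ihd := ih d.length hdlen d rfl
      have hdhead : d = [] ∨ ∃ x xs, d = x :: xs ∧ (k x == k c) = false := by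
        cases hdd : d with
        | nil => exact Or.inl rfl
        | cons x xs => exact Or.inr ⟨x, xs, rfl, pvDropWhileHead cs x xs (hd ▸ hdd)⟩
      have hslice : ∀ (xs : List Char),
          PySem.List.slice xs none (some (max n 0)) = xs.take n.toNat := by
        intro xs
        rw [PySem.List.slice_to xs (le_max_right n 0)]
        congr 1; omega
      rw [show pvGroupRuns k (c :: cs) =
            (k c, c :: g) :: pvGroupRuns k d by rw [pvGroupRuns]]
      by_cases hk : k c
      · -- matching run
        have hall : ∀ x ∈ c :: g, k x = true := by
          intro x hx
          rcases List.mem_cons.mp hx with rfl | hx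
          · exact hk
          · rw [hgk x hx]; exact hk
        have : pvAChars k n 0 (c :: cs) = pvAChars k n 0 ((c :: g) ++ d) := by
          rw [hsplit]; rfl
        rw [this, pvMatchRun k n (c :: g) hall 0 d]
        have hreset : pvAChars k n (0 + ((c :: g).length : Int)) d = pvAChars k n 0 d := by
          apply pvReset
          rcases hdhead with h | ⟨x, xs, hxx, hkx⟩
          · exact Or.inl h
          · refine Or.inr ⟨x, xs, hxx, ?_⟩
            simp [hk] at hkx
            exact hkx
        rw [hreset, ihd]
        simp [hk, hslice]
      · -- non-matching run
        have hall : ∀ x ∈ c :: g, k x = false := by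
          intro x hx
          rcases List.mem_cons.mp hx with rfl | hx
          · exact Bool.eq_false_iff.mpr hk
          · rw [hgk x hx]; exact Bool.eq_false_iff.mpr hk
        have : pvAChars k n 0 (c :: cs) = pvAChars k n 0 ((c :: g) ++ d) := by
          rw [hsplit]; rfl
        rw [this, pvNonmatchRun k n (c :: g) hall d, ihd]
        simp [hk]

-- ===== VERDICT (by name: the statement is the Claim_ definition above) =====
theorem collapse_runs_spec : Claim_equal_collapse_runs := by
  intro text char max_run _
  unfold Spec_collapse_runs collapse_runs collapse_runs_alt
  set k : Char → Bool := fun ch => PySem.Str.upper (String.mk [ch]) == PySem.Str.upper char with hk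
  simp only []
  rw [pvFoldl_snd k max_run text.toList 0 []]
  rw [List.nil_append, pvMain k max_run text.toList]
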